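-- pv_equiv track=rewrite | github.com/Sridesh/Game-Space | 3/Minimum Cost/Minimum_cost.py | subtract_column_min
-- ===== SOURCE A (Python) =====
-- def subtract_column_min(matrix):
--     num_rows = len(matrix)
--     num_cols = len(matrix[0]) if num_rows > 0 else 0
--     processed_matrix = []
--
--     # Finding column minima
--     col_minima = [min(matrix[row][col] for row in range(num_rows)) for col in range(num_cols)]
--
--     # Subtracting column minima from each element in the matrix
--     for row in matrix:
--         processed_row = [row[col] - col_minima[col] for col in range(num_cols)]
--         processed_matrix.append(processed_row)
--
--     return processed_matrix
-- ===== SOURCE B (Python) =====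
-- def subtract_column_min(matrix):
--     # Transpose with zip, normalise each column, transpose back (column-major).
--     cols = [[x - min(col) for x in col] for col in zip(*matrix)]
--     if not cols:
--         return [[] for _ in matrix]
--     return [list(row) for row in zip(*cols)]
-- ===== Notes on version B (the rewrite author's own statement) =====
-- stated objective: alternative
-- what changed: B works column-major: it transposes the matrix with zip(*matrix), rewrites each whole column as [x - min(col) for x in col], and transposes back, replacing A's index-based per-column min scans and index-based row rebuild with index-free whole-column list processing.
import Mathlib
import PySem

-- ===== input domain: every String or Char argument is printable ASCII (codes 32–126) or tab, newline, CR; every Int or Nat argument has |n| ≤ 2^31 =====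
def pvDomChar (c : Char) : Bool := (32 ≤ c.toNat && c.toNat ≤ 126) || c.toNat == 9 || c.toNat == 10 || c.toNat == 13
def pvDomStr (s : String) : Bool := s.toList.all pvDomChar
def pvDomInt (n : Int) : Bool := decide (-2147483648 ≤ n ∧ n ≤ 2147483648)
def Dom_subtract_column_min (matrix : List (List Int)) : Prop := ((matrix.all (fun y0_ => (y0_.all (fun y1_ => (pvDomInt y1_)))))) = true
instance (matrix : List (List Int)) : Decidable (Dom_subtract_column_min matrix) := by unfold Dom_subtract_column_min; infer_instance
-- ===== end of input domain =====

-- B transposes the matrix, normalises each whole column, and transposes back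
-- (column-major, index-free), instead of A's index-based per-column min scans.


-- ===== PORT A =====
-- col entry of A's comprehension: min(matrix[row][col] for row in range(num_rows));
-- indexing via getD is exact on Pre_ (all indices in range there)
def subtract_column_min (matrix : List (List Int)) : List (List Int) :=
  let num_rows := matrix.length
  let num_cols := if num_rows > 0 then (matrix.headD []).length else 0
  let col_minima := (List.range num_cols).map (fun col =>
    match (List.range num_rows).map (fun r => (matrix.getD r []).getD col 0) with
    | [] => 0   -- unreachable: num_cols > 0 forces num_rows > 0
    | x :: xs => xs.foldl min x)
  matrix.map (fun row =>
    (List.range num_cols).map (fun col => row.getD col 0 - col_minima.getD col 0))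

-- ===== PORT B =====
-- Python's zip(*rows): i-th output tuple holds row[i] of every row, for i below the
-- shortest row's length (exact on Pre_, where every index taken is in range).
def pyZipStar (rows : List (List Int)) : List (List Int) :=
  let k := ((rows.map List.length).min?).getD 0
  (List.range k).map (fun i => rows.map (fun r => r.getD i 0))

def subtract_column_min_alt (matrix : List (List Int)) : List (List Int) :=
  let cols := (pyZipStar matrix).map (fun col =>
    col.map (fun x => x - (PySem.List.min? col (fun y => y)).getD 0))
  if cols.isEmpty then matrix.map (fun _ => ([] : List Int)) else pyZipStar cols

-- ===== PRECONDITION & SPEC =====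
-- Pre_ excludes exactly the jagged matrices on which the Python A raises IndexError:
-- some row shorter than the first row.
def Pre_subtract_column_min (matrix : List (List Int)) : Prop :=
  ∀ row ∈ matrix, (matrix.headD []).length ≤ row.length
instance (matrix : List (List Int)) : Decidable (Pre_subtract_column_min matrix) := by
  unfold Pre_subtract_column_min; infer_instance
def pvWitness_subtract_column_min : List (List Int) := [[1, 2], [0, 5], [3, 1]]

def Spec_subtract_column_min (matrix : List (List Int)) (out : List (List Int)) : Prop := out = subtract_column_min_alt matrix
instance (matrix : List (List Int)) (out : List (List Int)) : Decidable (Spec_subtract_column_min matrix out) := by unfold Spec_subtract_column_min; infer_instance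

-- ===== CLAIM (what is proved, stated in full; the proofs are below) =====
def Claim_equal_subtract_column_min : Prop := ∀ (matrix : List (List Int)), Dom_subtract_column_min matrix → Pre_subtract_column_min matrix → Spec_subtract_column_min matrix (subtract_column_min matrix)

-- ===== LEMMAS AND PROOFS =====

-- getD of a range-map at an in-range index
theorem getD_range_map (n c : Nat) (f : Nat → Int) (hc : c < n) :
    ((List.range n).map f).getD c 0 = f c := by
  simp [List.getD, hc]

-- the values A's generator enumerates, at column c, are the column of the matrix
theorem range_map_getD (c : Nat) (m : List (List Int)) :
    (List.range m.length).map (fun r => (m.getD r []).getD c 0)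
      = m.map (fun row => row.getD c 0) := by
  induction m with
  | nil => rfl
  | cons r0 rest ih =>
    simp only [List.length_cons, List.range_succ_eq_map, List.map_cons, List.map_map]
    exact congrArg _ (by simpa [Function.comp] using ih)

-- min? of a nonempty Nat list whose head is a lower bound
theorem foldl_min_of_le (a : Nat) (t : List Nat) (h : ∀ x ∈ t, a ≤ x) :
    t.foldl min a = a := by
  induction t with
  | nil => rfl
  | cons b t ih =>
    have hb : a ≤ b := h b (by simp)
    simpa [Nat.min_eq_left hb] using ih (fun x hx => h x (by simp [hx]))

theorem min?_head_le (a : Nat) (t : List Nat) (h : ∀ x ∈ t, a ≤ x) :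
    ((a :: t).min?).getD 0 = a := by
  rw [List.min?_cons', Option.getD_some, foldl_min_of_le a t h]

theorem ports_agree (matrix : List (List Int))
    (hpre : Pre_subtract_column_min matrix) :
    subtract_column_min matrix = subtract_column_min_alt matrix := by
  cases matrix with
  | nil => rfl
  | cons r0 rest =>
    -- zip(*m) truncates to the shortest row, which is the first row on Pre_
    have hlen : (((r0 :: rest).map List.length).min?).getD 0 = r0.length := by
      refine min?_head_le r0.length (rest.map List.length) ?_
      intro x hx
      obtain ⟨row, hrow, rfl⟩ := List.mem_map.mp hx
      exact hpre row (by simp [hrow])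
    have hzip : pyZipStar (r0 :: rest)
        = (List.range r0.length).map (fun i => (r0 :: rest).map (fun r => r.getD i 0)) := by
      simp only [pyZipStar]
      rw [hlen]
    by_cases hn0 : r0.length = 0
    · -- no columns: both sides map every row to []
      have hz0 : pyZipStar (r0 :: rest) = [] := by rw [hzip, hn0]; rfl
      simp [subtract_column_min, subtract_column_min_alt, hz0, hn0]
    · -- columns present: compare row by row, entry by entry
      -- B's normalised columns, written as a map over the column indices
      have hcols : (pyZipStar (r0 :: rest)).map (fun col =>
            col.map (fun x => x - (PySem.List.min? col (fun y => y)).getD 0))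
          = (List.range r0.length).map (fun i =>
              ((r0 :: rest).map (fun r => r.getD i 0)).map (fun x =>
                x - (PySem.List.min? ((r0 :: rest).map (fun r => r.getD i 0)) (fun y => y)).getD 0)) := by
        rw [hzip, List.map_map]; rfl
      obtain ⟨k, hk⟩ : ∃ k, r0.length = k + 1 := ⟨r0.length - 1, by omega⟩
      -- each normalised column has the row count as its length, so the
      -- second zip runs over exactly the row count
      have hlen2 : (((List.range r0.length).map (fun i =>
              ((r0 :: rest).map (fun r => r.getD i 0)).map (fun x =>
                x - (PySem.List.min? ((r0 :: rest).map (fun r => r.getD i 0)) (fun y => y)).getD 0)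
            )).map List.length).min?.getD 0 = (r0 :: rest).length := by
        have hcl : ((List.range r0.length).map (fun i =>
              ((r0 :: rest).map (fun r => r.getD i 0)).map (fun x =>
                x - (PySem.List.min? ((r0 :: rest).map (fun r => r.getD i 0)) (fun y => y)).getD 0)
            )).map List.length
            = (List.range r0.length).map (fun _ => (r0 :: rest).length) := by
          rw [List.map_map]; apply List.map_congr_left; intro i _; simp
        rw [hcl, hk, List.range_succ_eq_map, List.map_cons]
        exact min?_head_le _ _ (by simp)
      have hne : (((List.range r0.length).map (fun i =>
              ((r0 :: rest).map (fun r => r.getD i 0)).map (fun x =>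
                x - (PySem.List.min? ((r0 :: rest).map (fun r => r.getD i 0)) (fun y => y)).getD 0)
            )).isEmpty) = false := by
        rw [hk]
        simp [List.range_succ_eq_map]
      -- A's column minima agree with B's per-column min
      have hmin : ∀ c < r0.length,
          (match (List.range (rest.length + 1)).map
              (fun r => ((r0 :: rest).getD r []).getD c 0) with
            | [] => (0 : Int)
            | x :: xs => xs.foldl min x)
          = (PySem.List.min? ((r0 :: rest).map (fun r => r.getD c 0)) (fun y => y)).getD 0 := by
        intro c hc
        rw [show rest.length + 1 = (r0 :: rest).length from rfl, range_map_getD c (r0 :: rest)]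
        simp [PySem.List.min?_id_cons]
      -- rewrite B into its row-indexed form
      have hB : subtract_column_min_alt (r0 :: rest)
          = (List.range (rest.length + 1)).map (fun j =>
              ((List.range r0.length).map (fun i =>
                ((r0 :: rest).map (fun r => r.getD i 0)).map (fun x =>
                  x - (PySem.List.min? ((r0 :: rest).map (fun r => r.getD i 0)) (fun y => y)).getD 0))).map
                (fun c => c.getD j 0)) := by
        simp only [subtract_column_min_alt]
        rw [hcols, hne]
        simp only [Bool.false_eq_true, if_false]
        simp only [pyZipStar]
        rw [hlen2]
        rfl
      rw [hB]
      -- reduce A's header let/if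
      simp only [subtract_column_min, List.length_cons, List.headD_cons, gt_iff_lt,
        Nat.succ_pos, if_true]
      apply List.ext_getElem (by simp)
      intro j h1 h2
      have hj : j < rest.length + 1 := by simpa using h2
      simp only [List.getElem_map, List.getElem_range, List.map_map]
      apply List.map_congr_left
      intro c hcmem
      have hc : c < r0.length := List.mem_range.mp hcmem
      rw [getD_range_map _ c _ hc, hmin c hc]
      simp only [Function.comp_apply]
      conv_rhs => rw [List.getD_eq_getElem _ _ (by simpa using hj)]
      rw [List.getElem_map]
      rfl

-- ===== VERDICT (by name: the statement is the Claim_ definition above) =====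
theorem subtract_column_min_spec : Claim_equal_subtract_column_min := by
  intro matrix _ hpre
  unfold Spec_subtract_column_min
  exact ports_agree matrix hpre
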